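-- pv_equiv track=rewrite | github.com/choinara0/Algorithm | Programmer/Level 1/배수들의 합.py | solution
-- ===== SOURCE A (Python) =====
-- def solution(n, m, numbers):
--     answer = []
--
--     for i in range(n, m+1):
--         for j in range(len(numbers)):
--             if i%numbers[j]==0:
--                 answer.append(i)
--                 break
--
--     return sum(answer)
-- ===== SOURCE B (Python) =====
-- def solution(n, m, numbers):
--     # Per-divisor stepping over multiples instead of testing every i against every divisor.
--     hits = set()
--     for d in numbers:
--         if d == 0:
--             continue  # nothing to step through for divisor 0
--         step = abs(d)
--         start = -((-n) // step) * step  # smallest multiple of step that is >= n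
--         for i in range(start, m + 1, step):
--             hits.add(i)
--     return sum(hits)
-- ===== Notes on version B (the rewrite author's own statement) =====
-- stated objective: alternative
-- what changed: Instead of testing every i in [n,m] against each divisor, B steps directly through each nonzero divisor's multiples (arithmetic progression from the first multiple >= n) and sums their set union, so the per-i inner scan disappears.
-- outside the precondition, e.g. on solution(1, 3, [1, 0]): A returns 6, B returns 6; on solution(5, 3, [0]): A returns 0, B returns 0
import Mathlib
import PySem

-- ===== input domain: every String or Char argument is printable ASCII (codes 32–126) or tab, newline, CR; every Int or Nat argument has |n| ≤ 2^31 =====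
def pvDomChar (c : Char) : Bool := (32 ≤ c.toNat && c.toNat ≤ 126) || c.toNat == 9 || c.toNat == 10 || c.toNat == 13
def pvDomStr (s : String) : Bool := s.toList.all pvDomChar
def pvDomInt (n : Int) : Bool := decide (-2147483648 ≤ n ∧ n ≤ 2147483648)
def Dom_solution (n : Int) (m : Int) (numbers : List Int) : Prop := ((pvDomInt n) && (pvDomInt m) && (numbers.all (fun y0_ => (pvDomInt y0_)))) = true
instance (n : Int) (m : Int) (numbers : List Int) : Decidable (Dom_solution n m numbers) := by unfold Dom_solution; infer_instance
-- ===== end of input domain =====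

-- B replaces A's per-i scan of the divisor list by stepping directly through each nonzero
-- divisor's multiples (collected into a set): a genuinely different traversal of the same data
-- (objective: alternative).

-- ===== PORT A =====
-- inner loop: 'for j in range(len(numbers)): if i % numbers[j] == 0: answer.append(i); break'
def solutionInner (i : Int) (ds : List Int) (answer : List Int) : List Int :=
  match ds with
  | [] => answer
  | d :: rest => if PySem.Int.mod i d == 0 then answer ++ [i] else solutionInner i rest answer

def solution (n : Int) (m : Int) (numbers : List Int) : Int :=
  ((PySem.List.pyRange n (m+1) 1).foldl (fun answer i => solutionInner i numbers answer) []).sum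

-- ===== PORT B =====
-- body of B's outer loop: 'if d == 0: continue'; step = abs(d); start = -((-n)//step)*step; for i in range(start, m+1, step): hits.add(i)
def altCollect (n : Int) (m : Int) (hits : PySem.Set Int) (d : Int) : PySem.Set Int :=
  if d = 0 then hits else
  let step : Int := if d < 0 then -d else d
  let start : Int := -(PySem.Int.floordiv (-n) step) * step
  (PySem.List.pyRange start (m+1) step).foldl PySem.Set.add hits

def solution_alt (n : Int) (m : Int) (numbers : List Int) : Int :=
  (numbers.foldl (altCollect n m) PySem.Set.empty).sum

-- ===== PRECONDITION & SPEC =====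
-- Pre_ excludes lists containing 0: there A raises ZeroDivisionError (i % 0) unless every i in the
-- range happens to match an earlier divisor; B skips the zero divisor and returns (and agrees with A
-- wherever A returns, but that corner stays outside the proved claim).
def Pre_solution (n : Int) (m : Int) (numbers : List Int) : Prop := (0 : Int) ∉ numbers
instance (n : Int) (m : Int) (numbers : List Int) : Decidable (Pre_solution n m numbers) := by unfold Pre_solution; infer_instance
def pvWitness_solution : Int × Int × List Int := (1, 10, [2, 3])

def Spec_solution (n : Int) (m : Int) (numbers : List Int) (out : Int) : Prop := out = solution_alt n m numbers
instance (n : Int) (m : Int) (numbers : List Int) (out : Int) : Decidable (Spec_solution n m numbers out) := by unfold Spec_solution; infer_instance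

-- ===== CLAIM (what is proved, stated in full; the proofs are below) =====
def Claim_equal_solution : Prop := ∀ (n : Int) (m : Int) (numbers : List Int), Dom_solution n m numbers → Pre_solution n m numbers → Spec_solution n m numbers (solution n m numbers)

-- ===== LEMMAS AND PROOFS =====

-- A's inner loop appends i exactly when some divisor divides i
theorem solutionInner_eq (i : Int) (ds : List Int) (answer : List Int) :
    solutionInner i ds answer =
      if ds.any (fun d => PySem.Int.mod i d == 0) then answer ++ [i] else answer := by
  induction ds with
  | nil => simp [solutionInner]
  | cons d rest ih =>
    by_cases h : PySem.Int.mod i d == 0 <;> simp [solutionInner, h, ih]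

-- A computes the sum of the filtered range
theorem solution_eq_filter (n m : Int) (numbers : List Int) :
    solution n m numbers =
      ((PySem.List.pyRange n (m+1) 1).filter
        (fun i => numbers.any (fun d => PySem.Int.mod i d == 0))).sum := by
  unfold solution
  simp only [solutionInner_eq]
  rw [PySem.List.foldl_append_if_eq_filter]
  simp

-- membership in B's accumulated set after the outer loop
theorem mem_foldl_collect (n m : Int) (ds : List Int) (hits : PySem.Set Int) (x : Int)
    (hds : ∀ d ∈ ds, d ≠ 0) :
    x ∈ ds.foldl (altCollect n m) hits ↔
      x ∈ hits ∨ ∃ d ∈ ds, x ∈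
        (let step : Int := if d < 0 then -d else d
         PySem.List.pyRange (-(PySem.Int.floordiv (-n) step) * step) (m+1) step) := by
  induction ds generalizing hits with
  | nil => simp
  | cons d rest ih =>
    have hd0 : d ≠ 0 := hds d (List.mem_cons_self ..)
    simp only [List.foldl_cons, ih _ (fun e he => hds e (List.mem_cons_of_mem d he)), List.mem_cons]
    rw [show altCollect n m hits d = PySem.Set.update hits
          (let step : Int := if d < 0 then -d else d
           PySem.List.pyRange (-(PySem.Int.floordiv (-n) step) * step) (m+1) step) by
          unfold altCollect; rw [if_neg hd0]; rfl,
        PySem.Set.mem_update]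
    constructor
    · rintro ((h | h) | h)
      · exact Or.inl h
      · exact Or.inr ⟨d, Or.inl rfl, h⟩
      · obtain ⟨e, he, hx⟩ := h; exact Or.inr ⟨e, Or.inr he, hx⟩
    · rintro (h | ⟨e, (rfl | he), hx⟩)
      · exact Or.inl (Or.inl h)
      · exact Or.inl (Or.inr hx)
      · exact Or.inr ⟨e, he, hx⟩

theorem nodup_foldl_collect (n m : Int) (ds : List Int) (hits : PySem.Set Int)
    (h : hits.Nodup) : (ds.foldl (altCollect n m) hits).Nodup := by
  induction ds generalizing hits with
  | nil => exact h
  | cons d rest ih =>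
    refine ih _ ?_
    unfold altCollect
    split
    · exact h
    · exact PySem.Set.nodup_update _ _ h

-- the multiples range of a nonzero divisor holds exactly the multiples of d in [n, m]
theorem range_mult_mem (s q n m x : Int) (hs : 0 < s)
    (h1 : (q - 1) * s < n) (h2 : n ≤ q * s) :
    x ∈ PySem.List.pyRange (q * s) (m + 1) s ↔ (n ≤ x ∧ x ≤ m ∧ s ∣ x) := by
  rw [PySem.List.mem_pyRange_iff_of_pos hs]
  constructor
  · rintro ⟨ha, hb, hc⟩
    have hx : s ∣ x := by
      have h := dvd_add hc (dvd_mul_left s q)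
      simpa using h
    exact ⟨le_trans h2 ha, by omega, hx⟩
  · rintro ⟨ha, hb, hc⟩
    obtain ⟨j, rfl⟩ := hc
    refine ⟨?_, by omega, ⟨j - q, by ring⟩⟩
    have hlt : s * (q - 1) < s * j := by
      have := lt_of_lt_of_le h1 ha
      linarith [this]
    have hqj : q - 1 < j := Int.lt_of_mul_lt_mul_left hlt (le_of_lt hs)
    calc q * s = s * q := by ring
      _ ≤ s * j := mul_le_mul_of_nonneg_left (by omega) (le_of_lt hs)

theorem mem_multiples {d : Int} (hd : d ≠ 0) (n m x : Int) :
    (x ∈ (let step : Int := if d < 0 then -d else d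
          PySem.List.pyRange (-(PySem.Int.floordiv (-n) step) * step) (m+1) step)) ↔
      (n ≤ x ∧ x ≤ m ∧ d ∣ x) := by
  have hpos : 0 < (if d < 0 then -d else d : Int) := by split_ifs <;> omega
  have hbr := (PySem.Int.neg_floordiv_neg_eq_iff_of_pos (a := n) (b := if d < 0 then -d else d)
      (q := -(PySem.Int.floordiv (-n) (if d < 0 then -d else d))) hpos).mp rfl
  have hdvd_iff : ∀ y : Int, (if d < 0 then -d else d : Int) ∣ y ↔ d ∣ y := by
    intro y; split_ifs with h
    · exact neg_dvd
    · exact Iff.rfl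
  show x ∈ PySem.List.pyRange _ (m+1) _ ↔ _
  rw [range_mult_mem _ _ n m x hpos hbr.1 hbr.2]
  exact and_congr_right (fun _ => and_congr_right (fun _ => hdvd_iff x))

theorem solution_spec_aux (n m : Int) (numbers : List Int)
    (hpre : (0 : Int) ∉ numbers) : solution n m numbers = solution_alt n m numbers := by
  rw [solution_eq_filter]
  unfold solution_alt
  apply List.Perm.sum_eq
  rw [List.perm_ext_iff_of_nodup
      ((PySem.List.nodup_pyRange_one n (m+1)).filter _)
      (nodup_foldl_collect n m numbers PySem.Set.empty List.nodup_nil)]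
  intro x
  rw [List.mem_filter, mem_foldl_collect _ _ _ _ _ (fun d hd h0 => hpre (h0 ▸ hd))]
  simp only [PySem.Set.empty, List.not_mem_nil, false_or]
  constructor
  · rintro ⟨hmem, hany⟩
    rw [PySem.List.mem_pyRange_one] at hmem
    rw [List.any_eq_true] at hany
    obtain ⟨d, hd, hdvd⟩ := hany
    rw [beq_iff_eq, PySem.Int.mod_eq_zero_iff_dvd] at hdvd
    have hd0 : d ≠ 0 := fun h => hpre (h ▸ hd)
    exact ⟨d, hd, (mem_multiples hd0 n m x).mpr ⟨hmem.1, by omega, hdvd⟩⟩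
  · rintro ⟨d, hd, hx⟩
    have hd0 : d ≠ 0 := fun h => hpre (h ▸ hd)
    obtain ⟨h1, h2, h3⟩ := (mem_multiples hd0 n m x).mp hx
    refine ⟨PySem.List.mem_pyRange_one.mpr ⟨h1, by omega⟩, ?_⟩
    rw [List.any_eq_true]
    exact ⟨d, hd, by rw [beq_iff_eq, PySem.Int.mod_eq_zero_iff_dvd]; exact h3⟩

-- ===== VERDICT (by name: the statement is the Claim_ definition above) =====
theorem solution_spec : Claim_equal_solution := by
  intro n m numbers _ hpre
  exact solution_spec_aux n m numbers hpre
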